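-- pv_equiv track=rewrite | github.com/flashouti/Python_Skillbox_Yurkov_Alexey | buns/mod3/task9.py | get_position
-- ===== SOURCE A (Python) =====
-- def get_position(count_step):
--     x, y, dx, dy, count_stp, cur_stp = 0, 0, 1, 1, 1, 0
--     for k in range(1, count_step+1):
--         dx = -dx
--         for i in range(count_stp):
--             x += dx
--             cur_stp += 1
--             if cur_stp >= count_step:
--                 return f"{x},{y}"
--         dy = -dy
--         for i in range(count_stp):
--             y += dy
--             cur_stp += 1
--             if cur_stp >= count_step:
--                 return f"{x},{y}"
--         count_stp += 1
--     return "0,0"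
-- ===== SOURCE B (Python) =====
-- def get_position(count_step):
--     if count_step <= 0:
--         return "0,0"
--     n = count_step
--     # find the spiral "round" k with (k-1)*k < n <= k*(k+1)
--     k = 1
--     while k * (k + 1) < n:
--         k += 1
--     s = 1 if k % 2 == 0 else -1          # direction of round k on both axes
--     b = -s * (k // 2)                    # position (b, b) at the start of round k
--     r = n - (k - 1) * k                  # steps taken inside round k
--     if r <= k:
--         return f"{b + r * s},{b}"
--     return f"{b + k * s},{b + (r - k) * s}"
-- ===== Notes on version B (the rewrite author's own statement) =====
-- stated objective: faster
-- what changed: Replaces the step-by-step simulation of the spiral walk (one loop iteration per step) by locating the spiral round k with (k-1)k < n <= k(k+1) via a short search and computing the final coordinates from a closed-form per-round formula.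
import Mathlib
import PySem

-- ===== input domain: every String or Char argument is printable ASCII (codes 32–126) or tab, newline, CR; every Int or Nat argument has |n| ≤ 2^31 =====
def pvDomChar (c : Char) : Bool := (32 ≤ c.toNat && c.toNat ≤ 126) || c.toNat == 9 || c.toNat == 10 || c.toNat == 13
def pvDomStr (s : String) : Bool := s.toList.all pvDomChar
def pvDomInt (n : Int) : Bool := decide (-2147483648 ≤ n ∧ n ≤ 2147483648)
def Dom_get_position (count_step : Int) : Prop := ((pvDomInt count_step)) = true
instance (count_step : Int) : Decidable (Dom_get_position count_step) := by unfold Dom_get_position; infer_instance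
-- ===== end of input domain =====

-- B replaces A's step-by-step spiral simulation by locating the spiral round k
-- with (k-1)k < n ≤ k(k+1) and computing the coordinates by a per-round formula.

-- ===== PORT A =====
-- inner 'for i in range(count_stp): pos += d; cur_stp += 1; if cur_stp >= count_step: return'
-- (one loop works on x, the other on y; Sum.inl = early return with the final moved coordinate)
def innerA : Nat → Int → Int → Int → Int → (Int ⊕ (Int × Int))
  | 0, pos, cur, _, _ => Sum.inr (pos, cur)
  | m+1, pos, cur, d, n =>
    let pos' := pos + d
    let cur' := cur + 1
    if n ≤ cur' then Sum.inl pos' else innerA m pos' cur' d n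

-- outer 'for k in range(1, count_step+1)' with state (x, y, dx, dy, count_stp, cur_stp)
def outerA : Nat → Int → Int → Int → Int → Int → Int → Int → String
  | 0, _, _, _, _, _, _, _ => "0,0"
  | f+1, x, y, dx, dy, cstp, cur, n =>
    let dx' := -dx
    match innerA cstp.toNat x cur dx' n with
    | Sum.inl xr => PySem.Int.toStr xr ++ "," ++ PySem.Int.toStr y
    | Sum.inr (x', cur') =>
      let dy' := -dy
      match innerA cstp.toNat y cur' dy' n with
      | Sum.inl yr => PySem.Int.toStr x' ++ "," ++ PySem.Int.toStr yr
      | Sum.inr (y', cur'') => outerA f x' y' dx' dy' (cstp+1) cur'' n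

def get_position (count_step : Int) : String :=
  outerA count_step.toNat 0 0 1 1 1 0 count_step

-- ===== PORT B =====
-- 'k = 1; while k*(k+1) < n: k += 1' (fuel n.toNat only makes the loop total; k never exceeds n)
def findk : Nat → Int → Int → Int
  | 0, k, _ => k
  | f+1, k, n => if k * (k+1) < n then findk f (k+1) n else k

def get_position_alt (count_step : Int) : String :=
  if count_step ≤ 0 then "0,0" else
  let n := count_step
  let k := findk n.toNat 1 n
  let s : Int := if PySem.Int.mod k 2 = 0 then 1 else -1
  let b : Int := -s * (PySem.Int.floordiv k 2)
  let r : Int := n - (k-1)*k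
  if r ≤ k then PySem.Int.toStr (b + r*s) ++ "," ++ PySem.Int.toStr b
  else PySem.Int.toStr (b + k*s) ++ "," ++ PySem.Int.toStr (b + (r-k)*s)

-- ===== PRECONDITION & SPEC =====
def Spec_get_position (count_step : Int) (out : String) : Prop := out = get_position_alt count_step
instance (count_step : Int) (out : String) : Decidable (Spec_get_position count_step out) := by unfold Spec_get_position; infer_instance

-- ===== CLAIM (what is proved, stated in full; the proofs are below) =====
def Claim_equal_get_position : Prop := ∀ (count_step : Int), Dom_get_position count_step → Spec_get_position count_step (get_position count_step)

-- ===== LEMMAS AND PROOFS =====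

-- direction of round k of the spiral: (-1)^k
def sgn (k : Int) : Int := if k % 2 = 0 then 1 else -1
-- position (base k, base k) after finishing round k
def base (k : Int) : Int := sgn k * ((k+1)/2)
-- the answer when step n falls inside round k
def segStr (n k : Int) : String :=
  let s := sgn k
  let b := base (k-1)
  let r := n - (k-1)*k
  if r ≤ k then PySem.Int.toStr (b + r*s) ++ "," ++ PySem.Int.toStr b
  else PySem.Int.toStr (b + k*s) ++ "," ++ PySem.Int.toStr (b + (r-k)*s)

theorem sgn_succ (k : Int) : sgn k = -sgn (k-1) := by
  unfold sgn; split_ifs <;> omega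

theorem base_succ (k : Int) (hk : 1 ≤ k) : base k = base (k-1) + k * sgn k := by
  unfold base sgn; split_ifs <;> omega

theorem innerA_spec (m : Nat) (pos cur d n : Int) (h : cur < n) :
    innerA m pos cur d n =
      if n ≤ cur + m then Sum.inl (pos + (n - cur) * d)
      else Sum.inr (pos + m * d, cur + m) := by
  induction m generalizing pos cur with
  | zero => simp [innerA]; omega
  | succ m ih =>
    show (if n ≤ cur + 1 then Sum.inl (pos + d) else innerA m (pos + d) (cur + 1) d n) = _
    by_cases h1 : n ≤ cur + 1
    · have hn : n = cur + 1 := by omega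
      rw [if_pos h1, if_pos (by push_cast; omega)]
      rw [hn]
      have : cur + 1 - cur = 1 := by ring
      rw [this, one_mul]
    · rw [if_neg h1, ih (pos + d) (cur + 1) (by omega)]
      push_cast
      by_cases h2 : n ≤ cur + 1 + (m : Int)
      · rw [if_pos h2, if_pos (by omega)]
        have e : pos + d + (n - (cur + 1)) * d = pos + (n - cur) * d := by ring
        rw [e]
      · rw [if_neg h2, if_neg (by omega)]
        have e1 : pos + d + (m:Int) * d = pos + ((m:Int) + 1) * d := by ring
        have e2 : cur + 1 + (m:Int) = cur + ((m:Int) + 1) := by ring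
        rw [e1, e2]

theorem findk_spec (fuel : Nat) (k n : Int) (hk : 1 ≤ k) (hlo : (k-1)*k < n)
    (hhi : n ≤ (k + fuel) * (k + fuel + 1)) :
    1 ≤ findk fuel k n ∧ (findk fuel k n - 1) * findk fuel k n < n ∧
      n ≤ findk fuel k n * (findk fuel k n + 1) := by
  induction fuel generalizing k with
  | zero =>
    simp only [findk]
    refine ⟨hk, hlo, ?_⟩
    simpa using hhi
  | succ f ih =>
    rw [show findk (f+1) k n = if k * (k+1) < n then findk f (k+1) n else k from rfl]
    by_cases h : k * (k+1) < n
    · rw [if_pos h]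
      exact ih (k+1) (by omega) (by simpa using h) (by push_cast at hhi ⊢; linarith)
    · rw [if_neg h]
      exact ⟨hk, hlo, by omega⟩

theorem outerA_spec (fuel : Nat) : ∀ (k n k₀ : Int), 1 ≤ k → k ≤ k₀ →
    (k₀ - 1) * k₀ < n → n ≤ k₀ * (k₀ + 1) → k₀ ≤ k - 1 + fuel →
    outerA fuel (base (k-1)) (base (k-1)) (sgn (k-1)) (sgn (k-1)) k ((k-1)*k) n = segStr n k₀ := by
  induction fuel with
  | zero => intro k n k₀ hk hkk hlo hhi hfuel; exfalso; simp at hfuel; omega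
  | succ f ih =>
    intro k n k₀ hk hkk hlo hhi hfuel
    have hmono : (k-1)*k ≤ (k₀-1)*k₀ := by nlinarith
    have hcur : (k-1)*k < n := lt_of_le_of_lt hmono hlo
    have hkt : ((k.toNat : Int)) = k := by omega
    show (match innerA k.toNat (base (k-1)) ((k-1)*k) (-sgn (k-1)) n with
      | Sum.inl xr => PySem.Int.toStr xr ++ "," ++ PySem.Int.toStr (base (k-1))
      | Sum.inr (x', cur') =>
        match innerA k.toNat (base (k-1)) cur' (-sgn (k-1)) n with
        | Sum.inl yr => PySem.Int.toStr x' ++ "," ++ PySem.Int.toStr yr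
        | Sum.inr (y', cur'') => outerA f x' y' (-sgn (k-1)) (-sgn (k-1)) (k+1) cur'' n) = segStr n k₀
    rw [← sgn_succ, innerA_spec _ _ _ _ _ hcur, hkt]
    by_cases hx : n ≤ (k-1)*k + k
    · rw [if_pos hx]
      have hk0 : k₀ = k := by
        have : ¬ (k + 1 ≤ k₀) := fun h => by nlinarith
        omega
      subst hk0
      show _ = segStr n k₀
      unfold segStr
      rw [if_pos (by omega)]
    · rw [if_neg hx]
      show (match innerA k.toNat (base (k-1)) ((k-1)*k + k) (sgn k) n with
        | Sum.inl yr => PySem.Int.toStr (base (k-1) + k * sgn k) ++ "," ++ PySem.Int.toStr yr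
        | Sum.inr (y', cur'') => outerA f (base (k-1) + k * sgn k) y' (sgn k) (sgn k) (k+1) cur'' n) = segStr n k₀
      rw [innerA_spec _ _ _ _ _ (by omega), hkt]
      by_cases hy : n ≤ (k-1)*k + k + k
      · rw [if_pos hy]
        have hk0 : k₀ = k := by
          have : ¬ (k + 1 ≤ k₀) := fun h => by nlinarith
          omega
        subst hk0
        unfold segStr
        rw [if_neg (by omega)]
        have e : n - ((k₀-1)*k₀ + k₀) = n - (k₀-1)*k₀ - k₀ := by ring
        rw [e]
      · rw [if_neg hy]
        have hk1 : k + 1 ≤ k₀ := by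
          by_contra h
          have hek : k₀ = k := by omega
          subst hek
          nlinarith
        have e1 : base (k-1) + k * sgn k = base ((k+1)-1) := by
          rw [show k+1-1 = k by ring, base_succ k hk]
        have e2 : sgn k = sgn ((k+1)-1) := by norm_num
        have e3 : (k-1)*k + k + k = ((k+1)-1)*(k+1) := by ring
        rw [e1, e2, e3]
        exact ih (k+1) n k₀ (by omega) hk1 hlo hhi (by push_cast at hfuel ⊢; omega)

theorem alt_eq_segStr (n : Int) (hn : 1 ≤ n) :
    get_position_alt n = segStr n (findk n.toNat 1 n) := by
  unfold get_position_alt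
  rw [if_neg (by omega)]
  dsimp only
  rw [PySem.Int.mod_eq_emod_of_pos (by norm_num), PySem.Int.floordiv_eq_ediv_of_pos (by norm_num)]
  unfold segStr
  have hb : -(if (findk n.toNat 1 n) % 2 = 0 then (1:Int) else -1) * (findk n.toNat 1 n / 2)
      = base (findk n.toNat 1 n - 1) := by
    unfold base sgn; split_ifs <;> omega
  rw [hb]
  have hs : (if (findk n.toNat 1 n) % 2 = 0 then (1:Int) else -1) = sgn (findk n.toNat 1 n) := rfl
  rw [hs]

-- ===== VERDICT (by name: the statement is the Claim_ definition above) =====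
theorem get_position_spec : Claim_equal_get_position := by
  intro n _
  unfold Spec_get_position
  by_cases hn : n ≤ 0
  · have h0 : n.toNat = 0 := by omega
    simp [get_position, get_position_alt, h0, outerA, hn]
  · have hn1 : 1 ≤ n := by omega
    have hcast : ((n.toNat : Int)) = n := by omega
    obtain ⟨h1, h2, h3⟩ := findk_spec n.toNat 1 n (by norm_num) (by omega)
      (by rw [hcast]; nlinarith)
    have hk0n : findk n.toNat 1 n ≤ n := by nlinarith [sq_nonneg (findk n.toNat 1 n - 1)]
    rw [alt_eq_segStr n hn1]
    have := outerA_spec n.toNat 1 n (findk n.toNat 1 n) (by norm_num) h1 h2 h3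
      (by rw [hcast]; omega)
    unfold get_position
    norm_num [base, sgn] at this
    exact this
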